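-- pv_equiv track=rewrite | github.com/unpingable/atproto-driftwatch | src/labeler/vintage_buckets.py | bucket_label
-- ===== SOURCE A (Python) =====
-- BOUNDARIES: list[str] = [
--     "2023-04-24",
--     "2023-07-24",
--     "2023-10-23",
--     "2024-01-22",
--     "2024-04-22",
--     "2024-07-22",
--     "2024-10-21",
--     "2025-01-20",
--     "2025-04-21",
--     "2025-07-21",
--     "2025-10-20",
--     "2026-01-19",
--     "2026-04-20",
-- ]
--
-- def bucket_label(created_at_iso: str) -> str:
--     """Return the vintage bucket label for a DID created at the given ISO date.
--
--     Returns e.g. 'v0_pre_2023-04-24', 'v1_2023-04-24_to_2023-07-24', ...,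
--     'v13_post_2026-04-20'. Treats NULL/empty as 'v_unknown'.
--     """
--     if not created_at_iso:
--         return "v_unknown"
--     # Compare by date prefix (yyyy-mm-dd) since BOUNDARIES are dates
--     d = created_at_iso[:10]
--     if d < BOUNDARIES[0]:
--         return f"v0_pre_{BOUNDARIES[0]}"
--     for i in range(len(BOUNDARIES) - 1):
--         if BOUNDARIES[i] <= d < BOUNDARIES[i + 1]:
--             return f"v{i+1}_{BOUNDARIES[i]}_to_{BOUNDARIES[i+1]}"
--     return f"v{len(BOUNDARIES)}_post_{BOUNDARIES[-1]}"
-- ===== SOURCE B (Python) =====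
-- BOUNDARIES: list[str] = [
--     "2023-04-24",
--     "2023-07-24",
--     "2023-10-23",
--     "2024-01-22",
--     "2024-04-22",
--     "2024-07-22",
--     "2024-10-21",
--     "2025-01-20",
--     "2025-04-21",
--     "2025-07-21",
--     "2025-10-20",
--     "2026-01-19",
--     "2026-04-20",
-- ]
--
--
-- def bucket_label(created_at_iso: str) -> str:
--     """Binary-search the bucket index, then format in a three-way branch."""
--     if not created_at_iso:
--         return "v_unknown"
--     d = created_at_iso[:10]
--     lo, hi = 0, len(BOUNDARIES)
--     while lo < hi:
--         mid = (lo + hi) // 2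
--         if BOUNDARIES[mid] <= d:
--             lo = mid + 1
--         else:
--             hi = mid
--     if lo == 0:
--         return f"v0_pre_{BOUNDARIES[0]}"
--     if lo == len(BOUNDARIES):
--         return f"v{lo}_post_{BOUNDARIES[-1]}"
--     return f"v{lo}_{BOUNDARIES[lo-1]}_to_{BOUNDARIES[lo]}"
-- ===== Notes on version B (the rewrite author's own statement) =====
-- stated objective: alternative
-- what changed: Replaces A's linear scan over the 12 boundary intervals (with a pairwise interval test per step) by a hand-written binary search for the bucket index followed by a single three-way formatting branch.
import Mathlib
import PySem

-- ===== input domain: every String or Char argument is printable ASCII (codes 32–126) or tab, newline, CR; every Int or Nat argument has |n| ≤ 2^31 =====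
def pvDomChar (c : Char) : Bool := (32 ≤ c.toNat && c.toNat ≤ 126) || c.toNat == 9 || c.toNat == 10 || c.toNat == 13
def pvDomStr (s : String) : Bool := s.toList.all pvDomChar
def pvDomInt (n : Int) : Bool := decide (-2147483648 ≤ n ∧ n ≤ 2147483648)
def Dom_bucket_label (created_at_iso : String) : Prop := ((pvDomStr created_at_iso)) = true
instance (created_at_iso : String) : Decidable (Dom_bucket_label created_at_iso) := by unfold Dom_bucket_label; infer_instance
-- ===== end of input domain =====

-- B replaces A's linear scan over the boundary intervals by a binary search for the
-- bucket index followed by a three-way formatting branch (alternative decomposition).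


def BOUNDARIES : List String :=
  ["2023-04-24", "2023-07-24", "2023-10-23", "2024-01-22", "2024-04-22",
   "2024-07-22", "2024-10-21", "2025-01-20", "2025-04-21", "2025-07-21",
   "2025-10-20", "2026-01-19", "2026-04-20"]

-- ===== PORT A =====
-- the 'for i in range(len(BOUNDARIES) - 1)' loop of A, recursion over the range list
def loopA (d : String) : List Int → String
  | [] => "v" ++ PySem.Int.toStr (BOUNDARIES.length : Int) ++ "_post_" ++
          PySem.List.pyGetD BOUNDARIES (-1) ""
  | i :: rest =>
    let bi := PySem.List.pyGetD BOUNDARIES i ""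
    let bi1 := PySem.List.pyGetD BOUNDARIES (i + 1) ""
    if bi ≤ d ∧ d < bi1 then
      "v" ++ PySem.Int.toStr (i + 1) ++ "_" ++ bi ++ "_to_" ++ bi1
    else loopA d rest

def bucket_label (created_at_iso : String) : String :=
  if created_at_iso = "" then "v_unknown"
  else
    let d := PySem.Str.slice created_at_iso none (some 10)
    if d < PySem.List.pyGetD BOUNDARIES 0 "" then
      "v0_pre_" ++ PySem.List.pyGetD BOUNDARIES 0 ""
    else loopA d (PySem.List.pyRange 0 ((BOUNDARIES.length : Int) - 1) 1)

-- ===== PORT B =====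
-- the 'while lo < hi' binary-search loop of Source B
def bisectB (d : String) (lo hi : Int) : Int :=
  if h : lo < hi then
    let mid := PySem.Int.floordiv (lo + hi) 2
    if PySem.List.pyGetD BOUNDARIES mid "" ≤ d then bisectB d (mid + 1) hi
    else bisectB d lo mid
  else lo
termination_by (hi - lo).toNat
decreasing_by
  · have h1 : lo ≤ PySem.Int.floordiv (lo + hi) 2 := by
      rw [PySem.Int.le_floordiv_iff_mul_le (by omega)]; omega
    omega
  · have h2 : PySem.Int.floordiv (lo + hi) 2 < hi := by
      rw [PySem.Int.floordiv_lt_iff_lt_mul (by omega)]; omega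
    omega

def bucket_label_alt (created_at_iso : String) : String :=
  if created_at_iso = "" then "v_unknown"
  else
    let d := PySem.Str.slice created_at_iso none (some 10)
    let lo := bisectB d 0 (BOUNDARIES.length : Int)
    if lo = 0 then "v0_pre_" ++ PySem.List.pyGetD BOUNDARIES 0 ""
    else if lo = (BOUNDARIES.length : Int) then
      "v" ++ PySem.Int.toStr lo ++ "_post_" ++ PySem.List.pyGetD BOUNDARIES (-1) ""
    else
      "v" ++ PySem.Int.toStr lo ++ "_" ++ PySem.List.pyGetD BOUNDARIES (lo - 1) "" ++
      "_to_" ++ PySem.List.pyGetD BOUNDARIES lo ""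

-- ===== PRECONDITION & SPEC =====
def Spec_bucket_label (created_at_iso : String) (out : String) : Prop := out = bucket_label_alt created_at_iso
instance (created_at_iso : String) (out : String) : Decidable (Spec_bucket_label created_at_iso out) := by unfold Spec_bucket_label; infer_instance

-- ===== CLAIM (what is proved, stated in full; the proofs are below) =====
def Claim_equal_bucket_label : Prop := ∀ (created_at_iso : String), Dom_bucket_label created_at_iso → Spec_bucket_label created_at_iso (bucket_label created_at_iso)

-- ===== LEMMAS AND PROOFS =====

-- binary-search invariant: if everything left of k is ≤ d and everything from k on is > d,
-- the while-loop returns k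
theorem bisectB_eq (d : String) (lo hi k : Int) (hlo : lo ≤ k) (hk : k ≤ hi)
    (hbelow : ∀ j : Int, lo ≤ j → j < k → PySem.List.pyGetD BOUNDARIES j "" ≤ d)
    (habove : ∀ j : Int, k ≤ j → j < hi → ¬ PySem.List.pyGetD BOUNDARIES j "" ≤ d) :
    bisectB d lo hi = k := by
  rw [bisectB]
  by_cases h : lo < hi
  · simp only [dif_pos h]
    have hml : lo ≤ PySem.Int.floordiv (lo + hi) 2 := by
      rw [PySem.Int.le_floordiv_iff_mul_le (by omega)]; omega
    have hmh : PySem.Int.floordiv (lo + hi) 2 < hi := by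
      rw [PySem.Int.floordiv_lt_iff_lt_mul (by omega)]; omega
    by_cases hc : PySem.List.pyGetD BOUNDARIES (PySem.Int.floordiv (lo + hi) 2) "" ≤ d
    · rw [if_pos hc]
      have hmk : PySem.Int.floordiv (lo + hi) 2 < k := by
        by_contra hkm
        push_neg at hkm
        exact habove _ hkm hmh hc
      exact bisectB_eq d _ hi k (by omega) hk (fun j h1 h2 => hbelow j (by omega) h2) habove
    · rw [if_neg hc]
      have hkm : k ≤ PySem.Int.floordiv (lo + hi) 2 := by
        by_contra hmk
        push_neg at hmk
        exact hc (hbelow _ hml hmk)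
      exact bisectB_eq d lo _ k hlo hkm hbelow (fun j h1 h2 => habove j h1 (by omega))
  · simp only [dif_neg h]
    omega
termination_by (hi - lo).toNat
decreasing_by
  · omega
  · omega

-- A's for-loop fires at interval k (1 ≤ k ≤ 12) when it reaches i = k - 1
theorem loopA_mid (d : String) (k a : Int) (ha0 : 0 ≤ a) (hak : a ≤ k - 1) (hk : k ≤ 12)
    (hbelow : ∀ j : Int, 0 ≤ j → j < k → PySem.List.pyGetD BOUNDARIES j "" ≤ d)
    (hup : ¬ PySem.List.pyGetD BOUNDARIES k "" ≤ d) :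
    loopA d (PySem.List.pyRange a 12 1) =
      "v" ++ PySem.Int.toStr k ++ "_" ++ PySem.List.pyGetD BOUNDARIES (k - 1) "" ++
      "_to_" ++ PySem.List.pyGetD BOUNDARIES k "" := by
  rw [PySem.List.pyRange_one_cons (by omega : a < 12)]
  simp only [loopA]
  by_cases hae : a = k - 1
  · have h1 : PySem.List.pyGetD BOUNDARIES a "" ≤ d := hbelow a ha0 (by omega)
    have h2 : d < PySem.List.pyGetD BOUNDARIES (a + 1) "" := by
      rw [show a + 1 = k from by omega]
      exact not_le.mp hup
    rw [if_pos ⟨h1, h2⟩, show a + 1 = k from by omega, show a = k - 1 from by omega]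
  · have h2 : ¬ (PySem.List.pyGetD BOUNDARIES a "" ≤ d ∧ d < PySem.List.pyGetD BOUNDARIES (a + 1) "") :=
      fun hp => absurd (hbelow (a + 1) (by omega) (by omega)) (not_le.mpr hp.2)
    rw [if_neg h2]
    exact loopA_mid d k (a + 1) (by omega) (by omega) hk hbelow hup
termination_by (12 - a).toNat
decreasing_by omega

-- when every boundary is ≤ d the loop falls through to the post label
theorem loopA_post (d : String) (a : Int) (ha0 : 0 ≤ a) (ha : a ≤ 12)
    (hbelow : ∀ j : Int, 0 ≤ j → j < 13 → PySem.List.pyGetD BOUNDARIES j "" ≤ d) :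
    loopA d (PySem.List.pyRange a 12 1) =
      "v" ++ PySem.Int.toStr (BOUNDARIES.length : Int) ++ "_post_" ++
      PySem.List.pyGetD BOUNDARIES (-1) "" := by
  by_cases h : a < 12
  · rw [PySem.List.pyRange_one_cons h]
    simp only [loopA]
    have h2 : ¬ (PySem.List.pyGetD BOUNDARIES a "" ≤ d ∧ d < PySem.List.pyGetD BOUNDARIES (a + 1) "") :=
      fun hp => absurd (hbelow (a + 1) (by omega) (by omega)) (not_le.mpr hp.2)
    rw [if_neg h2]
    exact loopA_post d (a + 1) (by omega) (by omega) hbelow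
  · rw [PySem.List.pyRange_one_eq_nil (by omega)]
    simp only [loopA]
termination_by (12 - a).toNat
decreasing_by omega


-- the common core: the two label computations agree for every date prefix d
theorem core_eq (d : String) :
    (if d < PySem.List.pyGetD BOUNDARIES 0 "" then
      "v0_pre_" ++ PySem.List.pyGetD BOUNDARIES 0 ""
     else loopA d (PySem.List.pyRange 0 ((BOUNDARIES.length : Int) - 1) 1)) =
    (let lo := bisectB d 0 (BOUNDARIES.length : Int)
     if lo = 0 then "v0_pre_" ++ PySem.List.pyGetD BOUNDARIES 0 ""
     else if lo = (BOUNDARIES.length : Int) then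
       "v" ++ PySem.Int.toStr lo ++ "_post_" ++ PySem.List.pyGetD BOUNDARIES (-1) ""
     else
       "v" ++ PySem.Int.toStr lo ++ "_" ++ PySem.List.pyGetD BOUNDARIES (lo - 1) "" ++
       "_to_" ++ PySem.List.pyGetD BOUNDARIES lo "") := by
  have hlen : (BOUNDARIES.length : Int) = 13 := by norm_num [BOUNDARIES]
  rw [hlen, show (13 : Int) - 1 = 12 from by norm_num]

  by_cases h0 : d < PySem.List.pyGetD BOUNDARIES 0 ""
  · rw [if_pos h0]
    have ha : ∀ j : Int, 0 ≤ j → j < 13 → ¬ PySem.List.pyGetD BOUNDARIES j "" ≤ d := by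
      intro j hj1 hj2 hc
      interval_cases j <;> exact absurd (le_trans (String.le_iff_toList_le.mpr (by decide)) hc) (not_le.mpr h0)
    have hbis : bisectB d 0 13 = 0 :=
      bisectB_eq d 0 13 0 le_rfl (by omega) (fun j h1 h2 => absurd h2 (by omega)) ha
    simp only [hbis]
    norm_num
  · have c0 : PySem.List.pyGetD BOUNDARIES 0 "" ≤ d := not_lt.mp h0
    by_cases c1 : PySem.List.pyGetD BOUNDARIES 1 "" ≤ d
    · by_cases c2 : PySem.List.pyGetD BOUNDARIES 2 "" ≤ d
      · by_cases c3 : PySem.List.pyGetD BOUNDARIES 3 "" ≤ d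
        · by_cases c4 : PySem.List.pyGetD BOUNDARIES 4 "" ≤ d
          · by_cases c5 : PySem.List.pyGetD BOUNDARIES 5 "" ≤ d
            · by_cases c6 : PySem.List.pyGetD BOUNDARIES 6 "" ≤ d
              · by_cases c7 : PySem.List.pyGetD BOUNDARIES 7 "" ≤ d
                · by_cases c8 : PySem.List.pyGetD BOUNDARIES 8 "" ≤ d
                  · by_cases c9 : PySem.List.pyGetD BOUNDARIES 9 "" ≤ d
                    · by_cases c10 : PySem.List.pyGetD BOUNDARIES 10 "" ≤ d
                      · by_cases c11 : PySem.List.pyGetD BOUNDARIES 11 "" ≤ d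
                        · by_cases c12 : PySem.List.pyGetD BOUNDARIES 12 "" ≤ d
                          · have hb : ∀ j : Int, 0 ≤ j → j < 13 → PySem.List.pyGetD BOUNDARIES j "" ≤ d := by
                              intro j hj1 hj2
                              interval_cases j
                              exacts [c0, c1, c2, c3, c4, c5, c6, c7, c8, c9, c10, c11, c12]
                            have hbis : bisectB d 0 13 = 13 :=
                              bisectB_eq d 0 13 13 (by omega) (by omega) hb (fun j h1 h2 hc => absurd h2 (by omega))
                            have hA := loopA_post d 0 (by omega) (by omega) hb
                            rw [if_neg (not_lt.mpr c0), hA]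
                            simp only [hbis, hlen]
                            norm_num
                          · have hb : ∀ j : Int, 0 ≤ j → j < 12 → PySem.List.pyGetD BOUNDARIES j "" ≤ d := by
                              intro j hj1 hj2
                              interval_cases j
                              exacts [c0, c1, c2, c3, c4, c5, c6, c7, c8, c9, c10, c11]
                            have ha : ∀ j : Int, 12 ≤ j → j < 13 → ¬ PySem.List.pyGetD BOUNDARIES j "" ≤ d := by
                              intro j hj1 hj2 hc
                              interval_cases j <;> exact c12 (le_trans (String.le_iff_toList_le.mpr (by decide)) hc)
                            have hbis : bisectB d 0 13 = 12 :=
                              bisectB_eq d 0 13 12 (by omega) (by omega) hb ha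
                            have hA := loopA_mid d 12 0 (by omega) (by omega) (by omega) hb (ha 12 le_rfl (by omega))
                            rw [if_neg (not_lt.mpr c0), hA]
                            simp only [hbis]
                            norm_num
                        · have hb : ∀ j : Int, 0 ≤ j → j < 11 → PySem.List.pyGetD BOUNDARIES j "" ≤ d := by
                            intro j hj1 hj2
                            interval_cases j
                            exacts [c0, c1, c2, c3, c4, c5, c6, c7, c8, c9, c10]
                          have ha : ∀ j : Int, 11 ≤ j → j < 13 → ¬ PySem.List.pyGetD BOUNDARIES j "" ≤ d := by
                            intro j hj1 hj2 hc
                            interval_cases j <;> exact c11 (le_trans (String.le_iff_toList_le.mpr (by decide)) hc)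
                          have hbis : bisectB d 0 13 = 11 :=
                            bisectB_eq d 0 13 11 (by omega) (by omega) hb ha
                          have hA := loopA_mid d 11 0 (by omega) (by omega) (by omega) hb (ha 11 le_rfl (by omega))
                          rw [if_neg (not_lt.mpr c0), hA]
                          simp only [hbis]
                          norm_num
                      · have hb : ∀ j : Int, 0 ≤ j → j < 10 → PySem.List.pyGetD BOUNDARIES j "" ≤ d := by
                          intro j hj1 hj2
                          interval_cases j
                          exacts [c0, c1, c2, c3, c4, c5, c6, c7, c8, c9]
                        have ha : ∀ j : Int, 10 ≤ j → j < 13 → ¬ PySem.List.pyGetD BOUNDARIES j "" ≤ d := by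
                          intro j hj1 hj2 hc
                          interval_cases j <;> exact c10 (le_trans (String.le_iff_toList_le.mpr (by decide)) hc)
                        have hbis : bisectB d 0 13 = 10 :=
                          bisectB_eq d 0 13 10 (by omega) (by omega) hb ha
                        have hA := loopA_mid d 10 0 (by omega) (by omega) (by omega) hb (ha 10 le_rfl (by omega))
                        rw [if_neg (not_lt.mpr c0), hA]
                        simp only [hbis]
                        norm_num
                    · have hb : ∀ j : Int, 0 ≤ j → j < 9 → PySem.List.pyGetD BOUNDARIES j "" ≤ d := by
                        intro j hj1 hj2
                        interval_cases j
                        exacts [c0, c1, c2, c3, c4, c5, c6, c7, c8]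
                      have ha : ∀ j : Int, 9 ≤ j → j < 13 → ¬ PySem.List.pyGetD BOUNDARIES j "" ≤ d := by
                        intro j hj1 hj2 hc
                        interval_cases j <;> exact c9 (le_trans (String.le_iff_toList_le.mpr (by decide)) hc)
                      have hbis : bisectB d 0 13 = 9 :=
                        bisectB_eq d 0 13 9 (by omega) (by omega) hb ha
                      have hA := loopA_mid d 9 0 (by omega) (by omega) (by omega) hb (ha 9 le_rfl (by omega))
                      rw [if_neg (not_lt.mpr c0), hA]
                      simp only [hbis]
                      norm_num
                  · have hb : ∀ j : Int, 0 ≤ j → j < 8 → PySem.List.pyGetD BOUNDARIES j "" ≤ d := by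
                      intro j hj1 hj2
                      interval_cases j
                      exacts [c0, c1, c2, c3, c4, c5, c6, c7]
                    have ha : ∀ j : Int, 8 ≤ j → j < 13 → ¬ PySem.List.pyGetD BOUNDARIES j "" ≤ d := by
                      intro j hj1 hj2 hc
                      interval_cases j <;> exact c8 (le_trans (String.le_iff_toList_le.mpr (by decide)) hc)
                    have hbis : bisectB d 0 13 = 8 :=
                      bisectB_eq d 0 13 8 (by omega) (by omega) hb ha
                    have hA := loopA_mid d 8 0 (by omega) (by omega) (by omega) hb (ha 8 le_rfl (by omega))
                    rw [if_neg (not_lt.mpr c0), hA]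
                    simp only [hbis]
                    norm_num
                · have hb : ∀ j : Int, 0 ≤ j → j < 7 → PySem.List.pyGetD BOUNDARIES j "" ≤ d := by
                    intro j hj1 hj2
                    interval_cases j
                    exacts [c0, c1, c2, c3, c4, c5, c6]
                  have ha : ∀ j : Int, 7 ≤ j → j < 13 → ¬ PySem.List.pyGetD BOUNDARIES j "" ≤ d := by
                    intro j hj1 hj2 hc
                    interval_cases j <;> exact c7 (le_trans (String.le_iff_toList_le.mpr (by decide)) hc)
                  have hbis : bisectB d 0 13 = 7 :=
                    bisectB_eq d 0 13 7 (by omega) (by omega) hb ha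
                  have hA := loopA_mid d 7 0 (by omega) (by omega) (by omega) hb (ha 7 le_rfl (by omega))
                  rw [if_neg (not_lt.mpr c0), hA]
                  simp only [hbis]
                  norm_num
              · have hb : ∀ j : Int, 0 ≤ j → j < 6 → PySem.List.pyGetD BOUNDARIES j "" ≤ d := by
                  intro j hj1 hj2
                  interval_cases j
                  exacts [c0, c1, c2, c3, c4, c5]
                have ha : ∀ j : Int, 6 ≤ j → j < 13 → ¬ PySem.List.pyGetD BOUNDARIES j "" ≤ d := by
                  intro j hj1 hj2 hc
                  interval_cases j <;> exact c6 (le_trans (String.le_iff_toList_le.mpr (by decide)) hc)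
                have hbis : bisectB d 0 13 = 6 :=
                  bisectB_eq d 0 13 6 (by omega) (by omega) hb ha
                have hA := loopA_mid d 6 0 (by omega) (by omega) (by omega) hb (ha 6 le_rfl (by omega))
                rw [if_neg (not_lt.mpr c0), hA]
                simp only [hbis]
                norm_num
            · have hb : ∀ j : Int, 0 ≤ j → j < 5 → PySem.List.pyGetD BOUNDARIES j "" ≤ d := by
                intro j hj1 hj2
                interval_cases j
                exacts [c0, c1, c2, c3, c4]
              have ha : ∀ j : Int, 5 ≤ j → j < 13 → ¬ PySem.List.pyGetD BOUNDARIES j "" ≤ d := by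
                intro j hj1 hj2 hc
                interval_cases j <;> exact c5 (le_trans (String.le_iff_toList_le.mpr (by decide)) hc)
              have hbis : bisectB d 0 13 = 5 :=
                bisectB_eq d 0 13 5 (by omega) (by omega) hb ha
              have hA := loopA_mid d 5 0 (by omega) (by omega) (by omega) hb (ha 5 le_rfl (by omega))
              rw [if_neg (not_lt.mpr c0), hA]
              simp only [hbis]
              norm_num
          · have hb : ∀ j : Int, 0 ≤ j → j < 4 → PySem.List.pyGetD BOUNDARIES j "" ≤ d := by
              intro j hj1 hj2
              interval_cases j
              exacts [c0, c1, c2, c3]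
            have ha : ∀ j : Int, 4 ≤ j → j < 13 → ¬ PySem.List.pyGetD BOUNDARIES j "" ≤ d := by
              intro j hj1 hj2 hc
              interval_cases j <;> exact c4 (le_trans (String.le_iff_toList_le.mpr (by decide)) hc)
            have hbis : bisectB d 0 13 = 4 :=
              bisectB_eq d 0 13 4 (by omega) (by omega) hb ha
            have hA := loopA_mid d 4 0 (by omega) (by omega) (by omega) hb (ha 4 le_rfl (by omega))
            rw [if_neg (not_lt.mpr c0), hA]
            simp only [hbis]
            norm_num
        · have hb : ∀ j : Int, 0 ≤ j → j < 3 → PySem.List.pyGetD BOUNDARIES j "" ≤ d := by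
            intro j hj1 hj2
            interval_cases j
            exacts [c0, c1, c2]
          have ha : ∀ j : Int, 3 ≤ j → j < 13 → ¬ PySem.List.pyGetD BOUNDARIES j "" ≤ d := by
            intro j hj1 hj2 hc
            interval_cases j <;> exact c3 (le_trans (String.le_iff_toList_le.mpr (by decide)) hc)
          have hbis : bisectB d 0 13 = 3 :=
            bisectB_eq d 0 13 3 (by omega) (by omega) hb ha
          have hA := loopA_mid d 3 0 (by omega) (by omega) (by omega) hb (ha 3 le_rfl (by omega))
          rw [if_neg (not_lt.mpr c0), hA]
          simp only [hbis]
          norm_num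
      · have hb : ∀ j : Int, 0 ≤ j → j < 2 → PySem.List.pyGetD BOUNDARIES j "" ≤ d := by
          intro j hj1 hj2
          interval_cases j
          exacts [c0, c1]
        have ha : ∀ j : Int, 2 ≤ j → j < 13 → ¬ PySem.List.pyGetD BOUNDARIES j "" ≤ d := by
          intro j hj1 hj2 hc
          interval_cases j <;> exact c2 (le_trans (String.le_iff_toList_le.mpr (by decide)) hc)
        have hbis : bisectB d 0 13 = 2 :=
          bisectB_eq d 0 13 2 (by omega) (by omega) hb ha
        have hA := loopA_mid d 2 0 (by omega) (by omega) (by omega) hb (ha 2 le_rfl (by omega))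
        rw [if_neg (not_lt.mpr c0), hA]
        simp only [hbis]
        norm_num
    · have hb : ∀ j : Int, 0 ≤ j → j < 1 → PySem.List.pyGetD BOUNDARIES j "" ≤ d := by
        intro j hj1 hj2
        interval_cases j
        exacts [c0]
      have ha : ∀ j : Int, 1 ≤ j → j < 13 → ¬ PySem.List.pyGetD BOUNDARIES j "" ≤ d := by
        intro j hj1 hj2 hc
        interval_cases j <;> exact c1 (le_trans (String.le_iff_toList_le.mpr (by decide)) hc)
      have hbis : bisectB d 0 13 = 1 :=
        bisectB_eq d 0 13 1 (by omega) (by omega) hb ha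
      have hA := loopA_mid d 1 0 (by omega) (by omega) (by omega) hb (ha 1 le_rfl (by omega))
      rw [if_neg (not_lt.mpr c0), hA]
      simp only [hbis]
      norm_num

-- ===== VERDICT (by name: the statement is the Claim_ definition above) =====
theorem bucket_label_spec : Claim_equal_bucket_label := by
  intro s _
  unfold Spec_bucket_label bucket_label bucket_label_alt
  by_cases hs : s = ""
  · simp [hs]
  · simp only [if_neg hs]
    exact core_eq (PySem.Str.slice s none (some 10))
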